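-- pv_equiv track=rewrite | github.com/Mercury03/A-Problem-Oriented-Taxonomy-of-Evaluation-Metrics-for-Time-Series-Anomaly-Detection | utils/t_f1.py | sequence_to_intervals
-- ===== SOURCE A (Python) =====
-- def sequence_to_intervals(binary_sequence):
--     intervals = []
--     n = len(binary_sequence)
--     i = 0
--     while i < n:
--         if binary_sequence[i] == 1:
--             start = i
--             while i + 1 < n and binary_sequence[i + 1] == 1:
--                 i += 1
--             end = i
--             intervals.append([start, end])
--         i += 1
--     return intervals
-- ===== SOURCE B (Python) =====
-- def sequence_to_intervals(binary_sequence):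
--     # Single flat pass with edge detection: open a run on a rising edge,
--     # close it on a falling edge, close a trailing run after the loop.
--     intervals = []
--     prev = False
--     start = 0
--     for i, x in enumerate(binary_sequence):
--         b = (x == 1)
--         if b and not prev:
--             start = i
--         elif prev and not b:
--             intervals.append([start, i - 1])
--         prev = b
--     if prev:
--         intervals.append([start, len(binary_sequence) - 1])
--     return intervals
-- ===== Notes on version B (the rewrite author's own statement) =====
-- stated objective: simpler
-- what changed: Replaces A's nested while loops (outer index scan with an inner run-extension loop) by a single flat pass with edge detection: a prev bit opens a run on a rising edge, closes it on a falling edge, and a trailing run is closed after the loop.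
import Mathlib
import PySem

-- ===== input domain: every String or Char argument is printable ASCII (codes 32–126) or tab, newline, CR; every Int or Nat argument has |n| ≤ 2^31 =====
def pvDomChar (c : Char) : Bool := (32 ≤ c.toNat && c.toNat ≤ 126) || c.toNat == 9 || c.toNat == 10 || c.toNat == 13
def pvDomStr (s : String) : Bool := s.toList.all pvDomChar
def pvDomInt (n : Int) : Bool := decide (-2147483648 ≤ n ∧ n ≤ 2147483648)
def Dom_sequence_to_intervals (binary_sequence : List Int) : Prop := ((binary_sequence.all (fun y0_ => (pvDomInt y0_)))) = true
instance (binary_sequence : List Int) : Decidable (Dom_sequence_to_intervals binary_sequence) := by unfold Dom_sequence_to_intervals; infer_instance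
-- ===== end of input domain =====

/- B replaces A's nested run-extension while loops by one flat edge-detection pass; objective: simpler. -/


-- ===== PORT A =====
-- Inner while loop: `while i + 1 < n and binary_sequence[i+1] == 1: i += 1`; returns the final i.
-- `fuel` only makes the loop total (fuel = n suffices: i increases and the loop needs i + 1 < n);
-- the Python indexes only in-range positions (i + 1 < n is checked first), so List.getD is exact.
def seqInnerA (fuel : Nat) (xs : List Int) (n i : Nat) : Nat :=
  match fuel with
  | 0 => i
  | k + 1 => if i + 1 < n ∧ xs.getD (i + 1) 0 = 1 then seqInnerA k xs n (i + 1) else i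

-- Outer while loop over i with the interval accumulator (fuel = n suffices: i grows by ≥ 1 per iteration).
def seqOuterA (fuel : Nat) (xs : List Int) (n i : Nat) (intervals : List (List Int)) : List (List Int) :=
  match fuel with
  | 0 => intervals
  | k + 1 =>
    if i < n then
      if xs.getD i 0 = 1 then
        let start := i
        let e := seqInnerA n xs n i
        seqOuterA k xs n (e + 1) (intervals ++ [[(start : Int), (e : Int)]])
      else
        seqOuterA k xs n (i + 1) intervals
    else intervals

def sequence_to_intervals (binary_sequence : List Int) : List (List Int) :=
  seqOuterA binary_sequence.length binary_sequence binary_sequence.length 0 []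

-- ===== PORT B =====
-- One fold step: state = (prev bit, current run start, intervals so far); p = (index, value).
def altStepB (st : Bool × Int × List (List Int)) (p : Int × Int) : Bool × Int × List (List Int) :=
  let b : Bool := p.2 == 1
  if b && !st.1 then (b, p.1, st.2.2)
  else if st.1 && !b then (b, st.2.1, st.2.2 ++ [[st.2.1, p.1 - 1]])
  else (b, st.2.1, st.2.2)

def sequence_to_intervals_alt (binary_sequence : List Int) : List (List Int) :=
  let st := (PySem.List.enumerate binary_sequence 0).foldl altStepB (false, 0, [])
  if st.1 then st.2.2 ++ [[st.2.1, (binary_sequence.length : Int) - 1]] else st.2.2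

-- ===== PRECONDITION & SPEC =====
def Spec_sequence_to_intervals (binary_sequence : List Int) (out : List (List Int)) : Prop := out = sequence_to_intervals_alt binary_sequence
instance (binary_sequence : List Int) (out : List (List Int)) : Decidable (Spec_sequence_to_intervals binary_sequence out) := by unfold Spec_sequence_to_intervals; infer_instance

-- ===== CLAIM (what is proved, stated in full; the proofs are below) =====
def Claim_equal_sequence_to_intervals : Prop := ∀ (binary_sequence : List Int), Dom_sequence_to_intervals binary_sequence → Spec_sequence_to_intervals binary_sequence (sequence_to_intervals binary_sequence)

-- ===== LEMMAS AND PROOFS =====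

-- Canonical run decomposition, structural on the list: scan0 = outside a run at index i,
-- scan1 = inside a run started at s, with index i next.
mutual
def scan0 : List Int → Int → List (List Int)
  | [], _ => []
  | x :: t, i => if x = 1 then scan1 t (i + 1) i else scan0 t (i + 1)
def scan1 : List Int → Int → Int → List (List Int)
  | [], i, s => [[s, i - 1]]
  | x :: t, i, s => if x = 1 then scan1 t (i + 1) s else [s, i - 1] :: scan0 t (i + 1)
end

def finishAt (L : Int) (st : Bool × Int × List (List Int)) : List (List Int) :=
  if st.1 then st.2.2 ++ [[st.2.1, L - 1]] else st.2.2

-- B computes the canonical decomposition.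
theorem lemB (xs : List Int) : ∀ (i : Int) (acc : List (List Int)) (prev : Bool) (s : Int),
    finishAt (i + xs.length) ((PySem.List.enumerate xs i).foldl altStepB (prev, s, acc))
      = acc ++ (if prev then scan1 xs i s else scan0 xs i) := by
  induction xs with
  | nil =>
    intro i acc prev s
    cases prev <;> simp [PySem.List.enumerate_nil, finishAt, scan0, scan1]
  | cons x t ih =>
    intro i acc prev s
    rw [PySem.List.enumerate_cons]
    simp only [List.foldl_cons]
    have hlen : i + ((x :: t).length : Int) = (i + 1) + (t.length : Int) := by
      push_cast [List.length_cons]; ring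
    rw [hlen]
    by_cases hx : x = 1
    · have hb : (x == 1) = true := by simpa using hx
      cases prev
      · have hst : altStepB (false, s, acc) (i, x) = (true, i, acc) := by
          simp [altStepB, hb]
        rw [hst, ih]
        simp [scan0, hx]
      · have hst : altStepB (true, s, acc) (i, x) = (true, s, acc) := by
          simp [altStepB, hb]
        rw [hst, ih]
        simp [scan1, hx]
    · have hb : (x == 1) = false := by simpa using hx
      cases prev
      · have hst : altStepB (false, s, acc) (i, x) = (false, s, acc) := by
          simp [altStepB, hb]
        rw [hst, ih]
        simp [scan0, hx]
      · have hst : altStepB (true, s, acc) (i, x) = (false, s, acc ++ [[s, i - 1]]) := by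
          simp [altStepB, hb]
        rw [hst, ih]
        simp [scan1, hx]

theorem alt_eq_scan0 (xs : List Int) : sequence_to_intervals_alt xs = scan0 xs 0 := by
  have h := lemB xs 0 [] false 0
  simp only [zero_add] at h
  simpa [sequence_to_intervals_alt, finishAt] using h

-- the inner loop only moves i forward
theorem seqInnerA_ge (xs : List Int) (n : Nat) : ∀ (f i : Nat), i ≤ seqInnerA f xs n i := by
  intro f
  induction f with
  | zero => intro i; simp [seqInnerA]
  | succ k ih =>
    intro i
    rw [seqInnerA]
    split
    · exact le_trans (Nat.le_succ i) (ih (i + 1))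
    · exact le_refl i

-- the inner while loop matches scan1 (any fuel ≥ the remaining length suffices)
theorem lemInner (xs : List Int) : ∀ (f j : Nat) (s : Int), xs.length - (j + 1) ≤ f →
    scan1 (xs.drop (j + 1)) ((j : Int) + 1) s
      = [s, (seqInnerA f xs xs.length j : Int)] ::
          scan0 (xs.drop (seqInnerA f xs xs.length j + 1)) ((seqInnerA f xs xs.length j : Int) + 1) := by
  intro f
  induction f with
  | zero =>
    intro j s hk
    have hdrop : xs.drop (j + 1) = [] := List.drop_eq_nil_of_le (by omega)
    simp only [seqInnerA, hdrop]
    simp [scan1, scan0]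
  | succ k ih =>
    intro j s hk
    by_cases hc : j + 1 < xs.length ∧ xs.getD (j + 1) 0 = 1
    · obtain ⟨hlt, hval⟩ := hc
      have hstep : seqInnerA (k + 1) xs xs.length j = seqInnerA k xs xs.length (j + 1) := by
        rw [seqInnerA, if_pos ⟨hlt, hval⟩]
      have hdrop : xs.drop (j + 1) = xs[j + 1] :: xs.drop (j + 2) := by
        rw [List.drop_eq_getElem_cons hlt]
      have hone : xs[j + 1] = (1 : Int) := by
        rwa [List.getD_eq_getElem _ _ hlt] at hval
      rw [hdrop, hone]
      simp only [scan1]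
      rw [hstep]
      have := ih (j + 1) s (by omega)
      push_cast at this ⊢
      convert this using 2
    · have hstop : seqInnerA (k + 1) xs xs.length j = j := by
        rw [seqInnerA, if_neg hc]
      rw [hstop]
      by_cases hlt : j + 1 < xs.length
      · have hval : xs.getD (j + 1) 0 ≠ 1 := by tauto
        have hone : xs[j + 1] ≠ (1 : Int) := by
          rwa [List.getD_eq_getElem _ _ hlt] at hval
        have hdrop : xs.drop (j + 1) = xs[j + 1] :: xs.drop (j + 2) := by
          rw [List.drop_eq_getElem_cons hlt]
        rw [hdrop]
        simp only [scan1, scan0, if_neg hone]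
        norm_num
      · have hdrop : xs.drop (j + 1) = [] := List.drop_eq_nil_of_le (by omega)
        rw [hdrop]
        simp [scan1, scan0]

-- the outer while loop matches scan0 (any fuel ≥ the remaining length suffices)
theorem lemOuter (xs : List Int) : ∀ (f i : Nat) (acc : List (List Int)), xs.length - i ≤ f →
    seqOuterA f xs xs.length i acc = acc ++ scan0 (xs.drop i) (i : Int) := by
  intro f
  induction f with
  | zero =>
    intro i acc hk
    rw [seqOuterA, List.drop_eq_nil_of_le (by omega)]
    simp [scan0]
  | succ k ih =>
    intro i acc hk
    by_cases hlt : i < xs.length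
    · have hdrop : xs.drop i = xs[i] :: xs.drop (i + 1) := List.drop_eq_getElem_cons hlt
      by_cases hval : xs.getD i 0 = 1
      · have hone : xs[i] = (1 : Int) := by rwa [List.getD_eq_getElem _ _ hlt] at hval
        set e := seqInnerA xs.length xs xs.length i with he
        have hie : i ≤ e := seqInnerA_ge xs xs.length xs.length i
        rw [seqOuterA, if_pos hlt, if_pos hval]
        rw [ih (e + 1) _ (by omega)]
        rw [hdrop]
        simp only [scan0, hone]
        rw [lemInner xs xs.length i ((i : Int)) (by omega)]
        simp [← he, List.append_assoc]
      · have hone : xs[i] ≠ (1 : Int) := by rwa [List.getD_eq_getElem _ _ hlt] at hval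
        rw [seqOuterA, if_pos hlt, if_neg hval]
        rw [ih (i + 1) _ (by omega), hdrop]
        simp only [scan0, if_neg hone]
        push_cast
        ring_nf
    · rw [seqOuterA, if_neg hlt, List.drop_eq_nil_of_le (by omega)]
      simp [scan0]

-- ===== VERDICT (by name: the statement is the Claim_ definition above) =====
theorem sequence_to_intervals_spec : Claim_equal_sequence_to_intervals := by
  intro xs _
  unfold Spec_sequence_to_intervals sequence_to_intervals
  rw [lemOuter xs xs.length 0 [] (by omega), alt_eq_scan0]
  simp
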